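-- pv_equiv track=rewrite | github.com/chinmay3/av1-simulator-project | av1sim/entropy.py | rle_encode_motion
-- ===== SOURCE A (Python) =====
-- EOB_TOKEN = 0
--
-- ZRUN_TOKEN = 1
--
-- VAL_TOKEN = 2
--
-- def rle_encode_motion(vectors):
--     tokens = []
--     run = 0
--     for dx, dy in vectors:
--         if dx == 0 and dy == 0:
--             run += 1
--             continue
--         if run > 0:
--             tokens.append((ZRUN_TOKEN, run))
--             run = 0
--         packed = ((dx + 128) << 8) | (dy + 128)
--         tokens.append((VAL_TOKEN, packed))
--     tokens.append((EOB_TOKEN, 0))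
--     return tokens
-- ===== SOURCE B (Python) =====
-- EOB_TOKEN = 0
-- ZRUN_TOKEN = 1
-- VAL_TOKEN = 2
--
-- def rle_encode_motion(vectors):
--     tokens = []
--     i, n = 0, len(vectors)
--     while i < n:
--         if vectors[i] == (0, 0):
--             j = i
--             while j < n and vectors[j] == (0, 0):
--                 j += 1
--             if j < n:
--                 tokens.append((ZRUN_TOKEN, j - i))
--             i = j
--         else:
--             dx, dy = vectors[i]
--             tokens.append((VAL_TOKEN, ((dx + 128) << 8) | (dy + 128)))
--             i += 1
--     tokens.append((EOB_TOKEN, 0))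
--     return tokens
-- ===== Notes on version B (the rewrite author's own statement) =====
-- stated objective: alternative
-- what changed: A carries a pending zero-run counter through a single element-by-element loop; B is a two-pointer run scanner: at each zero it scans ahead to find the whole maximal zero run at once, emits one ZRUN token only if the run is followed by a non-zero vector, and jumps past the run, so no pending-run state is threaded through the loop.
import Mathlib
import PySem

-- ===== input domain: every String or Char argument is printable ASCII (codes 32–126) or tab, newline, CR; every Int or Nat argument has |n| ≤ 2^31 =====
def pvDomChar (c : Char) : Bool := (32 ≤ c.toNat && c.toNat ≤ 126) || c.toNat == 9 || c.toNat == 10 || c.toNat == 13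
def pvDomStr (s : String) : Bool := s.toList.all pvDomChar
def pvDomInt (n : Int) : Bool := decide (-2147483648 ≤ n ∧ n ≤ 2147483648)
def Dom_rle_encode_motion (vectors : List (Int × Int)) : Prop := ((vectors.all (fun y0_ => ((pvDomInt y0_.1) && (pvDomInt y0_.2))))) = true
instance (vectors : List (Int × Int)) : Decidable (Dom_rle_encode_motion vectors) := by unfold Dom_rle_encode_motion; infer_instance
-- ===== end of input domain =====

-- B replaces A's pending-run accumulator with a two-pointer scan that consumes each
-- maximal zero run in one step (alternative decomposition, same cost; return value only,
-- neither program mutates its argument).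

-- ===== PORT A =====
-- A's for-loop: state (tokens, run); Python '<<' is Lean '<<<', '|' is PySem.Int.bor.
def rle_encode_motion (vectors : List (Int × Int)) : List (Int × Int) :=
  let st := vectors.foldl
    (fun (st : List (Int × Int) × Int) (p : Int × Int) =>
      if p.1 = 0 ∧ p.2 = 0 then (st.1, st.2 + 1)
      else
        let tokens := if st.2 > 0 then st.1 ++ [((1 : Int), st.2)] else st.1
        (tokens ++ [((2 : Int), PySem.Int.bor ((p.1 + 128) <<< 8) (p.2 + 128))], 0))
    ([], 0)
  st.1 ++ [((0 : Int), (0 : Int))]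

-- ===== PORT B =====
-- inner while of B: length of the leading run of (0,0) vectors (j - i)
def pvZrun : List (Int × Int) → Nat
  | [] => 0
  | p :: rest => if p = (0, 0) then pvZrun rest + 1 else 0

theorem pvZrun_le (l : List (Int × Int)) : pvZrun l ≤ l.length := by
  induction l with
  | nil => simp [pvZrun]
  | cons p rest ih => simp only [pvZrun, List.length_cons]; split <;> omega

-- outer while of B: on a zero head jump past the whole run (i = j), else emit a VAL token
def pvGoB : List (Int × Int) → List (Int × Int)
  | [] => [((0 : Int), (0 : Int))]
  | p :: rest =>
    if p = (0, 0) then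
      let k := pvZrun (p :: rest)
      let tail := (p :: rest).drop k
      (if tail ≠ [] then [((1 : Int), (k : Int))] else []) ++ pvGoB tail
    else
      ((2 : Int), PySem.Int.bor ((p.1 + 128) <<< 8) (p.2 + 128)) :: pvGoB rest
  termination_by l => l.length
  decreasing_by
    · simp only [List.length_drop]
      have := pvZrun_le rest
      simp only [pvZrun, if_pos ‹p = (0,0)›, List.length_cons]
      omega
    · simp

def rle_encode_motion_alt (vectors : List (Int × Int)) : List (Int × Int) :=
  pvGoB vectors

-- ===== PRECONDITION & SPEC =====
def Spec_rle_encode_motion (vectors : List (Int × Int)) (out : List (Int × Int)) : Prop := out = rle_encode_motion_alt vectors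
instance (vectors : List (Int × Int)) (out : List (Int × Int)) : Decidable (Spec_rle_encode_motion vectors out) := by unfold Spec_rle_encode_motion; infer_instance

-- ===== CLAIM (what is proved, stated in full; the proofs are below) =====
def Claim_equal_rle_encode_motion : Prop := ∀ (vectors : List (Int × Int)), Dom_rle_encode_motion vectors → Spec_rle_encode_motion vectors (rle_encode_motion vectors)

-- ===== LEMMAS AND PROOFS =====

-- A's loop body re-expressed as a recursion g over the rest of the list, with the pending run as a Nat
def pvGoA (run : Nat) : List (Int × Int) → List (Int × Int)
  | [] => [((0 : Int), (0 : Int))]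
  | p :: rest =>
    if p.1 = 0 ∧ p.2 = 0 then pvGoA (run + 1) rest
    else
      (if run > 0 then [((1 : Int), (run : Int))] else []) ++
        ((2 : Int), PySem.Int.bor ((p.1 + 128) <<< 8) (p.2 + 128)) :: pvGoA 0 rest

theorem pvFoldA (l : List (Int × Int)) : ∀ (tokens : List (Int × Int)) (run : Nat),
    (l.foldl (fun (st : List (Int × Int) × Int) (p : Int × Int) =>
      if p.1 = 0 ∧ p.2 = 0 then (st.1, st.2 + 1)
      else
        let tokens := if st.2 > 0 then st.1 ++ [((1 : Int), st.2)] else st.1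
        (tokens ++ [((2 : Int), PySem.Int.bor ((p.1 + 128) <<< 8) (p.2 + 128))], 0))
      (tokens, (run : Int))).1 ++ [((0 : Int), (0 : Int))] = tokens ++ pvGoA run l := by
  induction l with
  | nil => intro tokens run; simp [pvGoA]
  | cons p rest ih =>
    intro tokens run
    by_cases hz : p.1 = 0 ∧ p.2 = 0
    · simp only [List.foldl_cons, if_pos hz, pvGoA]
      have : ((run : Int) + 1) = ((run + 1 : Nat) : Int) := by push_cast; ring
      rw [this, ih]
    · simp only [List.foldl_cons, if_neg hz, pvGoA]
      by_cases hr : run > 0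
      · have h1 : ((run : Int) > 0) := by exact_mod_cast hr
        simp only [if_pos h1, if_pos hr]
        have := ih (tokens ++ [((1 : Int), (run : Int))] ++ [((2 : Int), PySem.Int.bor ((p.1 + 128) <<< 8) (p.2 + 128))]) 0
        simp only [Nat.cast_zero] at this
        rw [this]; simp
      · have h1 : ¬ ((run : Int) > 0) := by omega
        simp only [if_neg h1, if_neg hr]
        have := ih (tokens ++ [((2 : Int), PySem.Int.bor ((p.1 + 128) <<< 8) (p.2 + 128))]) 0
        simp only [Nat.cast_zero] at this
        rw [this]; simp

theorem pvGoA_eq_goB (l : List (Int × Int)) : ∀ run : Nat,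
    pvGoA run l = if run = 0 then pvGoB l
      else if l.drop (pvZrun l) = [] then [((0 : Int), (0 : Int))]
      else ((1 : Int), (run : Int) + (pvZrun l : Int)) :: pvGoB (l.drop (pvZrun l)) := by
  induction l with
  | nil =>
    intro run
    by_cases h : run = 0 <;> simp [pvGoA, pvGoB, pvZrun, h]
  | cons p rest ih =>
    intro run
    by_cases hz : p = (0, 0)
    · have hz' : p.1 = 0 ∧ p.2 = 0 := by rw [hz]; exact ⟨rfl, rfl⟩
      have hzr : pvZrun (p :: rest) = pvZrun rest + 1 := by simp [pvZrun, hz]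
      have hdrop : (p :: rest).drop (pvZrun (p :: rest)) = rest.drop (pvZrun rest) := by
        rw [hzr]; rfl
      have hB : pvGoB (p :: rest) =
          (if rest.drop (pvZrun rest) ≠ [] then [((1 : Int), ((pvZrun rest + 1 : Nat) : Int))] else []) ++
            pvGoB (rest.drop (pvZrun rest)) := by
        rw [pvGoB]; simp only [if_pos hz, hzr, List.drop_succ_cons]
      rw [pvGoA, if_pos hz', ih (run + 1), if_neg (by omega : ¬ (run + 1 = 0)), hzr]
      simp only [List.drop_succ_cons]
      by_cases hd : rest.drop (pvZrun rest) = []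
      · rw [if_pos hd, hB, if_neg (not_not_intro hd), hd]
        by_cases h : run = 0
        · rw [if_pos h, pvGoB]
          rfl
        · rw [if_neg h, if_pos rfl]
      · rw [if_neg hd, hB, if_pos hd]
        by_cases h : run = 0
        · rw [if_pos h, h]
          simp only [List.singleton_append]
          congr 2
          push_cast; ring
        · rw [if_neg h, if_neg hd]
          congr 2
          push_cast; ring
    · have hz' : ¬ (p.1 = 0 ∧ p.2 = 0) := by
        intro ⟨h1, h2⟩; exact hz (Prod.ext h1 h2)
      have hzr : pvZrun (p :: rest) = 0 := by simp [pvZrun, hz]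
      have hB : pvGoB (p :: rest) =
          ((2 : Int), PySem.Int.bor ((p.1 + 128) <<< 8) (p.2 + 128)) :: pvGoB rest := by
        rw [pvGoB]; simp [hz]
      rw [pvGoA, if_neg hz']
      have h0 := ih 0
      rw [if_pos rfl] at h0
      rw [h0]
      by_cases h : run = 0
      · simp [h, hB]
      · simp only [if_neg h, hzr, List.drop_zero, hB,
          if_neg (List.cons_ne_nil _ _), if_pos (by omega : run > 0)]
        simp

-- ===== VERDICT (by name: the statement is the Claim_ definition above) =====
theorem rle_encode_motion_spec : Claim_equal_rle_encode_motion := by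
  intro vectors _
  unfold Spec_rle_encode_motion rle_encode_motion rle_encode_motion_alt
  have := pvFoldA vectors [] 0
  simp only [Nat.cast_zero, List.nil_append] at this
  rw [this, pvGoA_eq_goB vectors 0, if_pos rfl]
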